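-- pv_equiv track=rewrite | github.com/sallfatima/step3 | modules/removal_export_pipeline/utils/general_utils.py | replace_in_positions
-- ===== SOURCE A (Python) =====
-- from typing import List, Tuple
--
-- def replace_in_positions(
--     string: str, target_char: str, replacement_char: str, positions: Tuple
-- ) -> str:
--     count = 0
--     new_string = ""
--     for char in string:
--         if char == target_char:
--             count += 1
--             if count in list(positions):
--                 new_string += replacement_char
--             else:
--                 new_string += char
--         else:
--             new_string += char
--     return new_string
-- ===== SOURCE B (Python) =====
-- def replace_in_positions(string, target_char, replacement_char, positions):
--     indices = [i for i, c in enumerate(string) if c == target_char]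
--     chars = list(string)
--     for p in positions:
--         if 1 <= p <= len(indices):
--             chars[indices[p - 1]] = replacement_char
--     return "".join(chars)
-- ===== Notes on version B (the rewrite author's own statement) =====
-- stated objective: alternative
-- what changed: Replaces A's single left-to-right scan with a streaming occurrence counter and string concatenation by precomputing the occurrence-index table once, then writing the replacement directly into a char list at indices[p-1] for each in-range position, and joining.
import Mathlib
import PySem

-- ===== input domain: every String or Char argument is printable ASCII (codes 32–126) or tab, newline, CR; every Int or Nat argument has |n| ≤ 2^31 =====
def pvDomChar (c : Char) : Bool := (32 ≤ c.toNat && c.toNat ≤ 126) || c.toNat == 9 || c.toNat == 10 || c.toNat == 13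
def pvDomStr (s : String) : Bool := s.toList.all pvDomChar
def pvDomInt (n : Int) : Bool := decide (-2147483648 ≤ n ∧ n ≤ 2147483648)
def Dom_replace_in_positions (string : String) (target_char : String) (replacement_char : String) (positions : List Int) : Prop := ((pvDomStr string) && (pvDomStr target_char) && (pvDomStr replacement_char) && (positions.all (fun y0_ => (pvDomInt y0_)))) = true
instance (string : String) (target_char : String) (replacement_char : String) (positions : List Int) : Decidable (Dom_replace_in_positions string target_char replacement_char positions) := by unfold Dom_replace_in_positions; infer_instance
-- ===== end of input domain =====

-- B replaces A's streamed counter (with a scan of positions at every occurrence) by a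
-- precomputed occurrence-index table and direct writes per position (objective: alternative).

-- ===== PORT A =====
-- count/new_string accumulated by a left fold over the characters, exactly as A's loop.
def replace_in_positions (string : String) (target_char : String) (replacement_char : String) (positions : List Int) : String :=
  let st := string.toList.foldl (fun (st : Int × List Char) char =>
    if [char] = target_char.toList then
      let count := st.1 + 1
      if count ∈ positions then (count, st.2 ++ replacement_char.toList)
      else (count, st.2 ++ [char])
    else (st.1, st.2 ++ [char])) (0, [])
  String.mk st.2

-- ===== PORT B =====
-- indices = [i for i,c in enumerate(string) if c == target_char]; chars = list(string);
-- write replacement at indices[p-1] for each in-range p; ''.join(chars).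
def replace_in_positions_alt (string : String) (target_char : String) (replacement_char : String) (positions : List Int) : String :=
  let indices : List Int := (PySem.List.enumerate string.toList 0).filterMap
    (fun ic => if [ic.2] = target_char.toList then some ic.1 else none)
  let chars0 : List (List Char) := string.toList.map (fun c => [c])
  let chars := positions.foldl (fun chs p =>
    if 1 ≤ p ∧ p ≤ (indices.length : Int) then
      chs.set (indices.getD (p - 1).toNat 0).toNat replacement_char.toList
    else chs) chars0
  String.mk chars.flatten

-- ===== PRECONDITION & SPEC =====
def Spec_replace_in_positions (string : String) (target_char : String) (replacement_char : String) (positions : List Int) (out : String) : Prop := out = replace_in_positions_alt string target_char replacement_char positions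
instance (string : String) (target_char : String) (replacement_char : String) (positions : List Int) (out : String) : Decidable (Spec_replace_in_positions string target_char replacement_char positions out) := by unfold Spec_replace_in_positions; infer_instance

-- ===== CLAIM (what is proved, stated in full; the proofs are below) =====
def Claim_equal_replace_in_positions : Prop := ∀ (string : String) (target_char : String) (replacement_char : String) (positions : List Int), Dom_replace_in_positions string target_char replacement_char positions → Spec_replace_in_positions string target_char replacement_char positions (replace_in_positions string target_char replacement_char positions)

-- ===== LEMMAS AND PROOFS =====

-- number of target occurrences in l
def pvOcc (t : List Char) (l : List Char) : Nat := l.countP (fun c => decide ([c] = t))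

-- the value the j-th output slot should take, given a count offset
def pvFc (t r : List Char) (P : List Int) (count : Int) (l : List Char) (j : Nat) : List Char :=
  if [l.getD j 'a'] = t ∧ (count + (pvOcc t (l.take (j+1)) : Int)) ∈ P then r else [l.getD j 'a']

-- occurrence indices of t in l, enumeration starting at s
def pvIdxS (t : List Char) (s : Int) (l : List Char) : List Int :=
  (PySem.List.enumerate l s).filterMap (fun ic => if [ic.2] = t then some ic.1 else none)

lemma pvIdxS_cons (t : List Char) (s : Int) (c : Char) (cs : List Char) :
    pvIdxS t s (c :: cs) = if [c] = t then s :: pvIdxS t (s+1) cs else pvIdxS t (s+1) cs := by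
  by_cases hc : [c] = t <;>
    simp [pvIdxS, PySem.List.enumerate_cons, List.filterMap_cons, hc]

lemma pvIdxS_nonneg (t : List Char) (s : Int) (l : List Char) :
    ∀ x ∈ pvIdxS t s l, s ≤ x := by
  induction l generalizing s with
  | nil => simp [pvIdxS]
  | cons c cs ih =>
    intro x hx
    rw [pvIdxS_cons] at hx
    split at hx
    · rcases List.mem_cons.mp hx with h | h
      · omega
      · have := ih (s+1) x h; omega
    · have := ih (s+1) x hx; omega

-- the k-th occurrence index is s + j  iff  l[j] matches and k occurrences precede j
lemma pvIdxS_spec (t : List Char) (l : List Char) :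
    ∀ (s : Int) (j k : Nat), j < l.length →
      ((k < (pvIdxS t s l).length ∧ (pvIdxS t s l).getD k 0 = s + j)
        ↔ ([l.getD j 'a'] = t ∧ k = pvOcc t (l.take j))) := by
  induction l with
  | nil => intro s j k hj; simp at hj
  | cons c cs ih =>
    intro s j k hj
    rw [pvIdxS_cons]
    by_cases hc : [c] = t
    · simp only [if_pos hc]
      cases j with
      | zero =>
        simp only [List.getD_cons_zero, List.take_zero, pvOcc, List.countP_nil]
        cases k with
        | zero => simp [hc]
        | succ k =>
          simp only [List.length_cons, List.getD_cons_succ, Nat.cast_zero, add_zero]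
          constructor
          · rintro ⟨hk, hg⟩
            have hk' : k < (pvIdxS t (s+1) cs).length := by omega
            rw [List.getD_eq_getElem _ 0 hk'] at hg
            have := pvIdxS_nonneg t (s+1) cs _ (List.getElem_mem hk')
            omega
          · rintro ⟨_, h⟩; omega
      | succ j =>
        have hj' : j < cs.length := by simpa using hj
        cases k with
        | zero =>
          constructor
          · rintro ⟨_, hg⟩
            simp only [List.getD_cons_zero] at hg
            omega
          · rintro ⟨_, h⟩
            simp [pvOcc, List.take_succ_cons, List.countP_cons, hc] at h
        | succ k =>
          simp only [List.length_cons, List.getD_cons_succ, Nat.add_lt_add_iff_right]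
          have h2 : (s : Int) + ((j + 1 : Nat) : Int) = (s + 1) + (j : Int) := by push_cast; ring
          rw [h2, ih (s+1) j k hj']
          simp only [pvOcc, List.getD_cons_succ, List.take_succ_cons, List.countP_cons, hc,
            decide_true, if_true]
          constructor
          · rintro ⟨h1, h3⟩; exact ⟨h1, by omega⟩
          · rintro ⟨h1, h3⟩; exact ⟨h1, by omega⟩
    · simp only [if_neg hc]
      cases j with
      | zero =>
        simp only [List.getD_cons_zero, Nat.cast_zero, add_zero]
        constructor
        · rintro ⟨hk, hg⟩
          rw [List.getD_eq_getElem _ 0 hk] at hg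
          have := pvIdxS_nonneg t (s+1) cs _ (List.getElem_mem hk)
          omega
        · rintro ⟨h, _⟩; exact absurd h hc
      | succ j =>
        have hj' : j < cs.length := by simpa using hj
        have h2 : (s : Int) + ((j + 1 : Nat) : Int) = (s + 1) + (j : Int) := by push_cast; ring
        simp only [List.getD_cons_succ, h2]
        rw [ih (s+1) j k hj']
        simp [pvOcc, List.take_succ_cons, List.countP_cons, hc]

lemma pvFc_cons_zero (t r : List Char) (P : List Int) (count : Int) (c : Char) (cs : List Char) :
    pvFc t r P count (c :: cs) 0
      = if [c] = t then (if count + 1 ∈ P then r else [c]) else [c] := by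
  have h1 : pvOcc t ((c :: cs).take (0+1)) = if [c] = t then 1 else 0 := by
    by_cases hc : [c] = t
    · rw [if_pos hc]
      simp [pvOcc, List.take_succ_cons, List.countP_cons, decide_eq_true hc]
    · rw [if_neg hc]
      simp [pvOcc, List.take_succ_cons, List.countP_cons, hc]
  unfold pvFc
  rw [h1, List.getD_cons_zero]
  by_cases hc : [c] = t
  · have hiff : ([c] = t ∧ count + ((if [c] = t then 1 else 0 : Nat) : Int) ∈ P)
        ↔ count + 1 ∈ P := by
      constructor
      · rintro ⟨_, h⟩; simpa [hc] using h
      · intro h; exact ⟨hc, by simpa [hc] using h⟩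
    rw [if_congr hiff rfl rfl, if_pos hc]
  · have hiff : ([c] = t ∧ count + ((if [c] = t then 1 else 0 : Nat) : Int) ∈ P) ↔ False := by
      simp [hc]
    rw [if_congr hiff rfl rfl, if_neg hc, if_neg not_false]

lemma pvFc_cons_succ (t r : List Char) (P : List Int) (count : Int) (c : Char) (cs : List Char) (j : Nat) :
    pvFc t r P count (c :: cs) (j+1)
      = pvFc t r P (count + if [c] = t then 1 else 0) cs j := by
  have hkey : count + (pvOcc t ((c :: cs).take (j+1+1)) : Int)
      = (count + if [c] = t then 1 else 0) + (pvOcc t (cs.take (j+1)) : Int) := by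
    rw [List.take_succ_cons]
    by_cases hc : [c] = t <;> simp [pvOcc, List.countP_cons, hc] <;> push_cast <;> ring
  unfold pvFc
  simp only [List.getD_cons_succ]
  exact if_congr (and_congr_right fun _ => by rw [hkey]) rfl rfl

lemma pvA_fold (t r : List Char) (P : List Int) (l : List Char) :
    ∀ (count : Int) (acc : List Char),
      l.foldl (fun (st : Int × List Char) char =>
        if [char] = t then
          let c2 := st.1 + 1
          if c2 ∈ P then (c2, st.2 ++ r) else (c2, st.2 ++ [char])
        else (st.1, st.2 ++ [char])) (count, acc)
      = (count + (pvOcc t l : Int),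
         acc ++ ((List.range l.length).map (pvFc t r P count l)).flatten) := by
  induction l with
  | nil => intro count acc; simp [pvOcc]
  | cons c cs ih =>
    intro count acc
    have hrange : (List.range (c :: cs).length).map (pvFc t r P count (c :: cs))
        = pvFc t r P count (c :: cs) 0
          :: (List.range cs.length).map (pvFc t r P (count + if [c] = t then 1 else 0) cs) := by
      rw [List.length_cons, List.range_succ_eq_map, List.map_cons, List.map_map]
      congr 1
      refine List.map_congr_left fun j _ => ?_
      simpa using pvFc_cons_succ t r P count c cs j
    have hocc : (pvOcc t (c :: cs) : Int) = (if [c] = t then 1 else 0) + (pvOcc t cs : Int) := by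
      by_cases hc : [c] = t <;> simp [pvOcc, List.countP_cons, hc] <;> push_cast <;> ring
    rw [hrange, pvFc_cons_zero, List.flatten_cons, List.foldl_cons]
    by_cases hc : [c] = t
    · by_cases hp : count + 1 ∈ P <;>
      · simp only [hc, hp, reduceIte, if_true, if_false, ih, hocc, Prod.mk.injEq]
        exact ⟨by ring, by simp [List.append_assoc]⟩
    · simp only [hc, reduceIte, if_false, ih, hocc, Prod.mk.injEq]
      exact ⟨by ring, by simp [List.append_assoc]⟩

lemma pvB_len (r : List Char) (idx : List Int) (P : List Int) :
    ∀ (chs : List (List Char)),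
      (P.foldl (fun chs p =>
        if 1 ≤ p ∧ p ≤ (idx.length : Int) then
          chs.set (idx.getD (p - 1).toNat 0).toNat r
        else chs) chs).length = chs.length := by
  induction P with
  | nil => intro chs; rfl
  | cons p ps ih =>
    intro chs
    rw [List.foldl_cons, ih]
    split <;> simp

lemma pvB_getD (r : List Char) (idx : List Int) (P : List Int) :
    ∀ (chs : List (List Char)) (j : Nat), j < chs.length →
      (P.foldl (fun chs p =>
        if 1 ≤ p ∧ p ≤ (idx.length : Int) then
          chs.set (idx.getD (p - 1).toNat 0).toNat r
        else chs) chs).getD j []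
      = if ∃ p ∈ P, (1 ≤ p ∧ p ≤ (idx.length : Int)) ∧ (idx.getD (p - 1).toNat 0).toNat = j
        then r else chs.getD j [] := by
  induction P with
  | nil => intro chs j hj; simp
  | cons p ps ih =>
    intro chs j hj
    rw [List.foldl_cons]
    have hlen : (if 1 ≤ p ∧ p ≤ (idx.length : Int) then
        chs.set (idx.getD (p - 1).toNat 0).toNat r else chs).length = chs.length := by
      split <;> simp
    rw [ih _ j (by omega)]
    by_cases hex : ∃ q ∈ ps, (1 ≤ q ∧ q ≤ (idx.length : Int)) ∧ (idx.getD (q - 1).toNat 0).toNat = j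
    · rw [if_pos hex, if_pos (by
        rcases hex with ⟨q, hq, hg⟩
        exact ⟨q, List.mem_cons_of_mem p hq, hg⟩)]
    · rw [if_neg hex]
      by_cases hp : (1 ≤ p ∧ p ≤ (idx.length : Int)) ∧ (idx.getD (p - 1).toNat 0).toNat = j
      · rw [if_pos hp.1]
        rw [List.getD_eq_getElem _ [] (by simpa using hj), List.getElem_set, if_pos hp.2]
        rw [if_pos ⟨p, List.mem_cons_self, hp⟩]
      · have hcond : ¬ ∃ q ∈ p :: ps, (1 ≤ q ∧ q ≤ (idx.length : Int)) ∧ (idx.getD (q - 1).toNat 0).toNat = j := by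
          rintro ⟨q, hq, hg⟩
          rcases List.mem_cons.mp hq with rfl | hq'
          · exact hp hg
          · exact hex ⟨q, hq', hg⟩
        rw [if_neg hcond]
        by_cases hv : 1 ≤ p ∧ p ≤ (idx.length : Int)
        · rw [if_pos hv]
          have hne : (idx.getD (p - 1).toNat 0).toNat ≠ j := fun h => hp ⟨hv, h⟩
          rw [List.getD_eq_getElem _ [] (by simpa using hj), List.getElem_set, if_neg hne,
            List.getD_eq_getElem _ [] hj]
        · rw [if_neg hv]

lemma pvOcc_take_succ (t : List Char) (l : List Char) (j : Nat) (hj : j < l.length)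
    (h : [l.getD j 'a'] = t) :
    pvOcc t (l.take (j+1)) = pvOcc t (l.take j) + 1 := by
  rw [List.getD_eq_getElem _ _ hj] at h
  rw [pvOcc, pvOcc, List.take_add_one, List.countP_append]
  simp [List.getElem?_eq_getElem hj, List.countP_cons, decide_eq_true h]

lemma pvCond (t : List Char) (P : List Int) (l : List Char) (j : Nat) (hj : j < l.length) :
    (∃ p ∈ P, (1 ≤ p ∧ p ≤ ((pvIdxS t 0 l).length : Int))
        ∧ ((pvIdxS t 0 l).getD (p - 1).toNat 0).toNat = j)
    ↔ ([l.getD j 'a'] = t ∧ ((pvOcc t (l.take (j+1)) : Nat) : Int) ∈ P) := by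
  constructor
  · rintro ⟨p, hpP, ⟨hp1, hp2⟩, hpj⟩
    have hk : (p - 1).toNat < (pvIdxS t 0 l).length := by omega
    have hv : (pvIdxS t 0 l).getD (p - 1).toNat 0 = (pvIdxS t 0 l)[(p - 1).toNat] :=
      List.getD_eq_getElem _ 0 hk
    have hnn : (0:Int) ≤ (pvIdxS t 0 l)[(p - 1).toNat] :=
      pvIdxS_nonneg t 0 l _ (List.getElem_mem hk)
    have hvj : (pvIdxS t 0 l).getD (p - 1).toNat 0 = (0:Int) + (j : Int) := by
      rw [hv]; omega
    have := (pvIdxS_spec t l 0 j (p - 1).toNat hj).mp ⟨hk, hvj⟩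
    refine ⟨this.1, ?_⟩
    have hocc := pvOcc_take_succ t l j hj this.1
    have : ((pvOcc t (l.take (j+1)) : Nat) : Int) = p := by
      rw [hocc]; push_cast; omega
    rwa [this]
  · rintro ⟨hm, hP⟩
    have hk := (pvIdxS_spec t l 0 j (pvOcc t (l.take j)) hj).mpr ⟨hm, rfl⟩
    refine ⟨((pvOcc t (l.take j) : Nat) : Int) + 1, ?_, ⟨by omega, by omega⟩, ?_⟩
    · have hocc := pvOcc_take_succ t l j hj hm
      have : ((pvOcc t (l.take (j+1)) : Nat) : Int) = ((pvOcc t (l.take j) : Nat) : Int) + 1 := by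
        rw [hocc]; push_cast; ring
      rwa [this] at hP
    · have h1 : (((pvOcc t (l.take j) : Nat) : Int) + 1 - 1).toNat = pvOcc t (l.take j) := by omega
      rw [h1, hk.2]; omega

theorem replace_in_positions_spec : Claim_equal_replace_in_positions := by
  intro string target_char replacement_char positions _
  unfold Spec_replace_in_positions replace_in_positions replace_in_positions_alt
  simp only []
  rw [pvA_fold]
  have hchars :
      positions.foldl (fun chs p =>
        if 1 ≤ p ∧ p ≤ ((pvIdxS target_char.toList 0 string.toList).length : Int) then
          chs.set ((pvIdxS target_char.toList 0 string.toList).getD (p - 1).toNat 0).toNat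
            replacement_char.toList
        else chs) (string.toList.map (fun c => [c]))
      = (List.range string.toList.length).map
          (pvFc target_char.toList replacement_char.toList positions 0 string.toList) := by
    apply List.ext_getElem
    · rw [pvB_len]; simp
    · intro j h1 h2
      have hj : j < string.toList.length := by
        rw [pvB_len] at h1; simpa using h1
      have hlen0 : j < (string.toList.map (fun c => [c])).length := by simpa using hj
      rw [← List.getD_eq_getElem _ [] h1, ← List.getD_eq_getElem _ [] h2]
      rw [pvB_getD _ _ _ _ j hlen0]
      rw [if_congr (pvCond target_char.toList positions string.toList j hj) rfl rfl]
      have hc0 : (string.toList.map (fun c => [c])).getD j [] = [string.toList.getD j 'a'] := by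
        rw [List.getD_eq_getElem _ [] hlen0, List.getElem_map, List.getD_eq_getElem _ _ hj]
      rw [hc0]
      have hr : ((List.range string.toList.length).map
            (pvFc target_char.toList replacement_char.toList positions 0 string.toList)).getD j []
          = pvFc target_char.toList replacement_char.toList positions 0 string.toList j := by
        rw [List.getD_eq_getElem _ [] (by simpa using hj), List.getElem_map, List.getElem_range]
      rw [hr]
      unfold pvFc
      exact (if_congr (and_congr_right fun _ => by rw [zero_add]) rfl rfl).symm
  rw [show (List.filterMap (fun ic => if [ic.2] = target_char.toList then some ic.1 else none)
      (PySem.List.enumerate string.toList)) = pvIdxS target_char.toList 0 string.toList from rfl]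
  rw [hchars]
  simp
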